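-- pv_equiv track=rewrite | github.com/GIS-DHSIT/DocWain | src/embedding/document_classifier.py | _infer_layout
-- ===== SOURCE A (Python) =====
-- def _infer_layout(text: str) -> str:
--     """Infer document layout type."""
--     lines = text.split("\n")
--
--     if len(lines) < 20:
--         return "simple_text"
--
--     indentation_ratio = sum(1 for line in lines if line.startswith((" ", "\t"))) / len(lines)
--     if indentation_ratio > 0.5:
--         return "structured_indented"
--
--     if any("\t" in line for line in lines):
--         return "tabular"
--
--     if sum(1 for line in lines if len(line) > 100) > len(lines) * 0.7:
--         return "prose_heavy"
--
--     return "mixed_layout"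
-- ===== SOURCE B (Python) =====
-- def _infer_layout(text: str) -> str:
--     """Infer document layout type via a character-level automaton (no line splitting)."""
--     n_lines = 1
--     indented = 0
--     has_tab = False
--     long_lines = 0
--     at_start = True
--     cur_len = 0
--     for ch in text:
--         if ch == "\n":
--             n_lines += 1
--             if cur_len > 100:
--                 long_lines += 1
--             cur_len = 0
--             at_start = True
--         else:
--             if at_start and (ch == " " or ch == "\t"):
--                 indented += 1
--             at_start = False
--             if ch == "\t":
--                 has_tab = True
--             cur_len += 1
--     if cur_len > 100:
--         long_lines += 1
--     if n_lines < 20: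
--         return "simple_text"
--     if 2 * indented > n_lines:
--         return "structured_indented"
--     if has_tab:
--         return "tabular"
--     if 10 * long_lines > 7 * n_lines:
--         return "prose_heavy"
--     return "mixed_layout"
-- ===== Notes on version B (the rewrite author's own statement) =====
-- stated objective: alternative
-- what changed: Replaced A's split-into-lines followed by three separate line scans (a counting sum, an any(), another counting sum) by a character-level automaton that never splits the text: one pass over the raw characters tracks line count, indented-line count, tab presence and long-line count, then the same decision cascade runs on those integers.
import Mathlib
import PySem

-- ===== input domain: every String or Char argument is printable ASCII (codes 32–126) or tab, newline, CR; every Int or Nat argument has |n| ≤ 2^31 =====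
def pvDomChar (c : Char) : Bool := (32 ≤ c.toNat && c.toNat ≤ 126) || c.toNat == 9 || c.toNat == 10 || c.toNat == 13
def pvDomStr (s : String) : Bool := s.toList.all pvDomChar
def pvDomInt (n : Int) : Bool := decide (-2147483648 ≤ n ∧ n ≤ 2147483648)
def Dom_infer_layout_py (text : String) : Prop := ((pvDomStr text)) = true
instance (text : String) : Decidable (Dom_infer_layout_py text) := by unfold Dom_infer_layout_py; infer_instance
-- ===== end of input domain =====

-- B replaces A's split-into-lines plus three line scans by a single character-level
-- automaton over the raw text (objective: alternative algorithm, same asymptotic cost).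

-- ===== PORT A =====
-- Python's float tests are ported as exact integer comparisons:
-- indented/n > 0.5 is exactly 2*indented > n (the float quotient cannot cross 0.5);
-- count > n*0.7 is ported as 10*count ≥ 7*n, which agrees with the float test whenever
-- 10*count ≠ 7*n; the tie 10*count = 7*n (where CPython's float result is length-dependent)
-- is excluded by Pre_ below.
def infer_layout_py (text : String) : String :=
  let lines := PySem.Chars.splitOn text.toList ['\n']
  if lines.length < 20 then "simple_text"
  else
    let indentCount : Int := lines.foldl
      (fun acc line => if PySem.Chars.startswith line [' '] || PySem.Chars.startswith line ['\t'] then acc + 1 else acc) 0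
    if 2 * indentCount > (lines.length : Int) then "structured_indented"
    else if lines.any (fun line => PySem.Chars.isIn ['\t'] line) then "tabular"
    else
      let longCount : Int := lines.foldl
        (fun acc line => if 100 < PySem.Chars.len line then acc + 1 else acc) 0
      if 10 * longCount ≥ 7 * (lines.length : Int) then "prose_heavy"
      else "mixed_layout"

-- ===== PORT B =====
-- state: (n_lines, indented, has_tab, long_lines, at_start, cur_len), as in Source B;
-- Source B's integer test `10*long_lines > 7*n_lines` is exact and is ported as written.
def pvStepB (st : Int × Int × Bool × Int × Bool × Int) (ch : Char) : Int × Int × Bool × Int × Bool × Int :=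
  match st with
  | (n, i, t, g, ast, k) =>
    if ch = '\n' then (n + 1, i, t, (if 100 < k then g + 1 else g), true, 0)
    else (n, (if ast ∧ (ch = ' ' ∨ ch = '\t') then i + 1 else i), (t || (ch = '\t')), g, false, k + 1)

def infer_layout_py_alt (text : String) : String :=
  match text.toList.foldl pvStepB ((1 : Int), (0 : Int), false, (0 : Int), true, (0 : Int)) with
  | (n, i, t, g, _ast, k) =>
    let g := if 100 < k then g + 1 else g
    if n < 20 then "simple_text"
    else if 2 * i > n then "structured_indented"
    else if t then "tabular"
    else if 10 * g > 7 * n then "prose_heavy"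
    else "mixed_layout"

-- ===== PRECONDITION & SPEC =====
-- Pre_ excludes texts (≥ 20 lines, at most half indented, tab-free) whose count of >100-char
-- lines is exactly 70% of the line count: there A's float test `count > len*0.7` is
-- binade-dependent (true for some line counts, false for others) and no value is canonical.
def Pre_infer_layout_py (text : String) : Prop :=
  let lines := PySem.Chars.splitOn text.toList ['\n']
  ¬ (20 ≤ lines.length ∧
     2 * (lines.countP (fun l => PySem.Chars.startswith l [' '] || PySem.Chars.startswith l ['\t'])) ≤ lines.length ∧
     lines.all (fun l => !PySem.Chars.isIn ['\t'] l) = true ∧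
     10 * (lines.countP (fun l => decide (100 < PySem.Chars.len l))) = 7 * lines.length)
instance (text : String) : Decidable (Pre_infer_layout_py text) := by unfold Pre_infer_layout_py; infer_instance

def pvWitness_infer_layout_py : String := "hello"

def Spec_infer_layout_py (text : String) (out : String) : Prop := out = infer_layout_py_alt text
instance (text : String) (out : String) : Decidable (Spec_infer_layout_py text out) := by unfold Spec_infer_layout_py; infer_instance

-- ===== CLAIM (what is proved, stated in full; the proofs are below) =====
def Claim_equal_infer_layout_py : Prop := ∀ (text : String), Dom_infer_layout_py text → Pre_infer_layout_py text → Spec_infer_layout_py text (infer_layout_py text)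

-- ===== LEMMAS AND PROOFS =====

-- reference single-pass splitter on '\n' used to connect the two ports
def pvSplit (pre : List Char) : List Char → List (List Char)
  | [] => [pre]
  | c :: r => if c = '\n' then pre :: pvSplit [] r else pvSplit (pre ++ [c]) r

theorem go_eq_pvSplit (l cur : List Char) (acc : List (List Char)) (fuel : Nat)
    (h : l.length < fuel) :
    PySem.Chars.splitOn.go ['\n'] fuel l cur acc = acc.reverse ++ pvSplit cur.reverse l := by
  induction l generalizing fuel cur acc with
  | nil =>
    cases fuel with
    | zero => omega
    | succ f => simp [PySem.Chars.splitOn.go, pvSplit]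
  | cons c rest ih =>
    cases fuel with
    | zero => omega
    | succ f =>
      by_cases hc : c = '\n'
      · subst hc
        have : (['\n'] : List Char).isPrefixOf ('\n' :: rest) = true := by simp [List.isPrefixOf]
        simp only [PySem.Chars.splitOn.go, this, if_true, List.drop_succ_cons, List.drop_zero,
          List.length_singleton]
        rw [ih [] (cur.reverse :: acc) f (by simpa using h)]
        simp [pvSplit]
      · have : (['\n'] : List Char).isPrefixOf (c :: rest) = false := by
          simp only [List.isPrefixOf, Bool.and_true, beq_eq_false_iff_ne, ne_eq]
          exact fun h => hc h.symm
        simp only [PySem.Chars.splitOn.go, this, Bool.false_eq_true, if_false]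
        rw [ih (c :: cur) acc f (by simpa using h)]
        simp [pvSplit, hc]

theorem splitOn_newline (s : List Char) :
    PySem.Chars.splitOn s ['\n'] = pvSplit [] s := by
  unfold PySem.Chars.splitOn
  simpa using go_eq_pvSplit s [] [] (s.length + 1) (by omega)

-- structural facts about pvSplit
theorem pvSplit_ne_nil (pre s : List Char) : pvSplit pre s ≠ [] := by
  induction s generalizing pre with
  | nil => simp [pvSplit]
  | cons c r ih =>
    by_cases hc : c = '\n' <;> simp [pvSplit, hc, ih]

theorem pvSplit_join (pre s : List Char) :
    List.intercalate ['\n'] (pvSplit pre s) = pre ++ s := by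
  induction s generalizing pre with
  | nil => simp [pvSplit, List.intercalate]
  | cons c r ih =>
    by_cases hc : c = '\n'
    · subst hc
      obtain ⟨h, t, ht⟩ : ∃ h t, pvSplit ([] : List Char) r = h :: t :=
        List.exists_cons_of_ne_nil (pvSplit_ne_nil [] r)
      simp only [pvSplit, if_true]
      have : List.intercalate ['\n'] (pre :: pvSplit [] r)
          = pre ++ '\n' :: List.intercalate ['\n'] (pvSplit [] r) := by
        rw [ht]; simp [List.intercalate, List.intersperse]
      rw [this, ih []]
      simp
    · simp only [pvSplit, hc, if_false, ih (pre ++ [c])]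
      simp

theorem pvSplit_no_newline (pre s : List Char) (hpre : '\n' ∉ pre) :
    ∀ l ∈ pvSplit pre s, '\n' ∉ l := by
  induction s generalizing pre with
  | nil => simpa [pvSplit] using hpre
  | cons c r ih =>
    by_cases hc : c = '\n'
    · subst hc
      simp only [pvSplit, if_true, List.mem_cons]
      rintro l (rfl | hl)
      · exact hpre
      · exact ih [] (by simp) l hl
    · simp only [pvSplit, hc, if_false]
      intro l hl
      exact ih (pre ++ [c]) (by simp [hpre, Ne.symm hc]) l hl

-- A's three per-line predicates, named
def pvInd (l : List Char) : Bool :=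
  PySem.Chars.startswith l [' '] || PySem.Chars.startswith l ['\t']
def pvTab (l : List Char) : Bool := l.any (fun c => c = '\t')
def pvLong (l : List Char) : Bool := decide (100 < (l.length : Int))

-- B's automaton over one newline-free line
theorem foldB_line (line : List Char) (hnl : '\n' ∉ line)
    (n i : Int) (t : Bool) (g : Int) (ast : Bool) (k : Int) :
    line.foldl pvStepB (n, i, t, g, ast, k) =
      (n,
       (if ast ∧ pvInd line = true then i + 1 else i),
       t || pvTab line,
       g,
       ast && line.isEmpty,
       k + line.length) := by
  induction line generalizing n i t g ast k with
  | nil => simp [pvInd, pvTab, PySem.Chars.startswith]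
  | cons c r ihr =>
    have hc : c ≠ '\n' := by intro h; exact hnl (by simp [h])
    have hr : '\n' ∉ r := fun h => hnl (by simp [h])
    simp only [List.foldl_cons, pvStepB, hc, if_false]
    rw [ihr hr]
    have hsw : ∀ d : Char, PySem.Chars.startswith (c :: r) [d] = decide (c = d) := by
      intro d
      by_cases hcd : c = d
      · subst hcd
        simp [(PySem.Chars.startswith_iff (c :: r) [c]).mpr ⟨r, rfl⟩]
      · have : PySem.Chars.startswith (c :: r) [d] = false := by
          rw [Bool.eq_false_iff]
          intro hx
          rcases (PySem.Chars.startswith_iff _ _).mp hx with ⟨t, ht⟩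
          simp at ht
          exact hcd ht.1.symm
        simp [this, hcd]
    cases ast with
    | false =>
      simp [pvInd, pvTab, hsw, List.any_cons, Bool.or_assoc]
      omega
    | true =>
      by_cases hsp : c = ' ' ∨ c = '\t'
      · have hdec : (decide (c = ' ') || decide (c = '\t')) = true := by
          rcases hsp with h | h <;> simp [h]
        simp [pvInd, pvTab, hsw, hsp, hdec, List.any_cons, Bool.or_assoc]
        omega
      · have h1 : c ≠ ' ' := fun h => hsp (Or.inl h)
        have h2 : c ≠ '\t' := fun h => hsp (Or.inr h)
        simp [pvInd, pvTab, hsw, h1, h2, List.any_cons]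
        omega

-- B's automaton over the join of newline-free lines
theorem foldB_lines (lines : List (List Char)) (hne : lines ≠ [])
    (hnl : ∀ l ∈ lines, '\n' ∉ l) (n i : Int) (t : Bool) (g : Int) :
    (List.intercalate ['\n'] lines).foldl pvStepB (n, i, t, g, true, 0) =
      (n + lines.length - 1,
       i + (lines.countP pvInd : Int),
       t || lines.any pvTab,
       g + (lines.dropLast.countP pvLong : Int),
       (lines.getLast hne).isEmpty,
       ((lines.getLast hne).length : Int)) := by
  induction lines generalizing n i t g with
  | nil => exact absurd rfl hne
  | cons l rest ih =>
    cases rest with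
    | nil =>
      have h1 : List.intercalate ['\n'] [l] = l := by
        simp [List.intercalate, List.intersperse]
      rw [h1, foldB_line l (hnl l (by simp)) n i t g true 0]
      simp [List.countP_cons]
      split_ifs <;> simp_all
    | cons l2 rest2 =>
      have hjoin : List.intercalate ['\n'] (l :: l2 :: rest2)
          = l ++ '\n' :: List.intercalate ['\n'] (l2 :: rest2) := by
        simp [List.intercalate, List.intersperse]
      rw [hjoin, List.foldl_append,
        foldB_line l (hnl l (by simp)) n i t g true 0, List.foldl_cons]
      have hstep : pvStepB
          (n, (if true = true ∧ pvInd l = true then i + 1 else i),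
           t || pvTab l, g, true && l.isEmpty, (0 : Int) + l.length) '\n'
          = (n + 1, (if true = true ∧ pvInd l = true then i + 1 else i),
             t || pvTab l, (if 100 < ((0 : Int) + l.length) then g + 1 else g), true, 0) := by
        simp [pvStepB]
      rw [hstep, ih (by simp) (fun x hx => hnl x (by simp [hx]))]
      have hlast : (l :: l2 :: rest2).getLast (by simp) = (l2 :: rest2).getLast (by simp) := by
        simp [List.getLast_cons]
      simp only [hlast, List.dropLast_cons_of_ne_nil (by simp : l2 :: rest2 ≠ []),
        List.countP_cons, List.any_cons, List.length_cons]
      refine Prod.ext ?_ (Prod.ext ?_ (Prod.ext ?_ (Prod.ext ?_ rfl)))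
      · simp; omega
      · simp; split_ifs <;> simp_all <;> omega
      · simp [Bool.or_assoc]
      · have hLl : pvLong l = decide (100 < ((0 : Int) + l.length)) := by
          simp [pvLong]
        simp only []
        split_ifs with hA hB hB <;> rw [hLl] at * <;> simp_all <;> omega

-- A's counting folds are countP
theorem foldl_count (lines : List (List Char)) (p : List Char → Bool) (a : Int) :
    lines.foldl (fun acc line => if p line then acc + 1 else acc) a = a + (lines.countP p : Int) := by
  induction lines generalizing a with
  | nil => simp
  | cons l ls ih =>
    simp only [List.foldl_cons, ih, List.countP_cons]
    by_cases h : p l = true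
    · simp [h]; omega
    · simp [h]

theorem foldl_count_len (lines : List (List Char)) (a : Int) :
    lines.foldl (fun acc line => if 100 < PySem.Chars.len line then acc + 1 else acc) a
      = a + (lines.countP (fun l => decide (100 < PySem.Chars.len l)) : Int) := by
  induction lines generalizing a with
  | nil => simp
  | cons l ls ih =>
    simp only [List.foldl_cons, ih, List.countP_cons]
    simp only [PySem.Chars.len_eq]
    by_cases h : (100 : Int) < l.length
    all_goals simp [h]
    all_goals omega

-- long-count over all lines = long-count over dropLast plus the last line's test
theorem countP_dropLast_last (lines : List (List Char)) (hne : lines ≠ []) (p : List Char → Bool) :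
    lines.countP p = lines.dropLast.countP p + (if p (lines.getLast hne) then 1 else 0) := by
  conv_lhs => rw [← List.dropLast_append_getLast hne]
  rw [List.countP_append]
  simp [List.countP_cons]

-- tab containment per line = any-char test, for newline-free lines
theorem isIn_tab_eq_any (l : List Char) :
    PySem.Chars.isIn ['\t'] l = l.any (fun c => c = '\t') := by
  by_cases h : '\t' ∈ l
  · have hinf : (['\t'] : List Char) <:+: l := by
      obtain ⟨a, b, hab⟩ := List.mem_iff_append.mp h
      exact ⟨a, b, by rw [hab]; simp⟩
    rw [List.any_eq_true.mpr ⟨'\t', h, by simp⟩]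
    exact (PySem.Chars.isIn_iff_infix _ _).mpr hinf
  · have h2 : ¬ (['\t'] : List Char) <:+: l := by
      intro hx
      obtain ⟨a, b, hab⟩ := hx
      exact h (by rw [← hab]; simp)
    rw [(PySem.Chars.isIn_eq_false_iff _ _).mpr h2]
    symm
    simp only [List.any_eq_false]
    intro c hc
    exact fun hct => h ((of_decide_eq_true hct) ▸ hc)

-- ===== VERDICT (by name: the statement is the Claim_ definition above) =====
theorem infer_layout_py_spec : Claim_equal_infer_layout_py := by
  intro text _ hpre
  unfold Spec_infer_layout_py infer_layout_py infer_layout_py_alt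
  unfold Pre_infer_layout_py at hpre
  rw [splitOn_newline] at hpre ⊢
  set lines := pvSplit [] text.toList with hl
  have hne : lines ≠ [] := pvSplit_ne_nil [] text.toList
  have hnl : ∀ l ∈ lines, '\n' ∉ l := pvSplit_no_newline [] text.toList (by simp)
  have hjoin : text.toList = List.intercalate ['\n'] lines := by
    rw [hl, pvSplit_join]; simp
  rw [hjoin, foldB_lines lines hne hnl 1 0 false 0]
  -- name A's three statistics
  set I := lines.countP pvInd with hI
  set T := lines.any pvTab with hT
  set G := lines.countP pvLong with hG
  have hGsplit := countP_dropLast_last lines hne pvLong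
  -- identify A's folds/predicates with the named statistics
  have hIa : lines.foldl (fun acc line =>
      if PySem.Chars.startswith line [' '] || PySem.Chars.startswith line ['\t'] then acc + 1 else acc) 0
      = (I : Int) := by
    simpa [pvInd, hI] using foldl_count lines pvInd 0
  have hTa : lines.any (fun line => PySem.Chars.isIn ['\t'] line) = T := by
    rw [hT]; exact List.any_congr rfl (fun l => isIn_tab_eq_any l)
  have hGa : lines.foldl (fun acc line => if 100 < PySem.Chars.len line then acc + 1 else acc) 0
      = (G : Int) := by
    rw [foldl_count_len lines 0]
    have hcc : lines.countP (fun l => decide (100 < PySem.Chars.len l)) = G := by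
      rw [hG]
      apply List.countP_congr
      intro l _
      simp [pvLong, PySem.Chars.len]
    rw [hcc]
    omega
  -- B's final long count, after the post-loop fix-up, is G
  have hGb : (if 100 < ((lines.getLast hne).length : Int)
        then (0 : Int) + lines.dropLast.countP pvLong + 1
        else (0 : Int) + lines.dropLast.countP pvLong) = (G : Int) := by
    rw [hG, hGsplit]
    split_ifs with h1 h2 h2 <;> simp [pvLong] at * <;> omega
  simp only [hIa, hTa, hGa]
  simp only [show (1 : Int) + lines.length - 1 = (lines.length : Int) from by omega,
    show (0 : Int) + (I : Int) = (I : Int) from by omega, Bool.false_or]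
  rw [hGb]
  by_cases h20 : lines.length < 20
  · have : (lines.length : Int) < 20 := by exact_mod_cast h20
    simp [h20, this]
  · have h20' : ¬ ((lines.length : Int) < 20) := by omega
    simp only [h20, h20', if_false]
    by_cases hind : 2 * (I : Int) > (lines.length : Int)
    · simp [hind]
    · simp only [hind, if_false]
      cases hTv : T with
      | true => simp
      | false =>
        simp only [Bool.false_eq_true, if_false]
        have hnotie : 10 * G ≠ 7 * lines.length := by
          intro hc
          apply hpre
          have hIeq : lines.countP
              (fun l => PySem.Chars.startswith l [' '] || PySem.Chars.startswith l ['\t']) = I :=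
            hI.symm
          have hGeq : lines.countP (fun l => decide (100 < PySem.Chars.len l)) = G := by
            rw [hG]
            apply List.countP_congr
            intro l _
            simp [pvLong, PySem.Chars.len]
          refine ⟨by omega, by rw [hIeq]; omega, ?_, by rw [hGeq]; exact hc⟩
          simp only [List.all_eq_true]
          intro l hlmem
          rw [isIn_tab_eq_any l]
          have := List.any_eq_false.mp (hT ▸ hTv) l hlmem
          simp [pvTab] at this
          simp
          exact fun x hx hxe => this (hxe ▸ hx)
        have hne10 : 10 * (G : Int) ≠ 7 * (lines.length : Int) := by exact_mod_cast hnotie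
        by_cases hlong : 10 * (G : Int) ≥ 7 * (lines.length : Int)
        · rw [if_pos hlong, if_pos (by omega)]
        · rw [if_neg hlong, if_neg (by omega)]
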